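-- pv_equiv track=rewrite | github.com/ferhatelmas/algo | topCoder/srms/400s/srm447/div2/important_tasks.py | maximalCost
-- ===== SOURCE A (Python) =====
-- def maximalCost(complexity, computers):
--     co, cc = sorted(complexity, reverse=True), sorted(computers, reverse=True)
--     lo, lc, i, j, c = len(co), len(cc), 0, 0, 0
--     while i < lo and j < lc:
--         if co[i] <= cc[j]:
--             c += 1
--             j += 1
--         i += 1
--     return c
-- ===== SOURCE B (Python) =====
-- def maximalCost(complexity, computers):
--     best = 0
--     for v in complexity:
--         d = sum(1 for t in complexity if t >= v) - sum(1 for c in computers if c >= v)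
--         if d > best:
--             best = d
--     return len(complexity) - best
-- ===== Notes on version B (the rewrite author's own statement) =====
-- stated objective: alternative
-- what changed: Replaces A's sort-both-lists greedy matching scan by the Hall-deficiency closed form: without any sorting, B returns len(complexity) minus the maximum over task-value thresholds v of (#tasks>=v - #computers>=v), clamped at 0.
import Mathlib
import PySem

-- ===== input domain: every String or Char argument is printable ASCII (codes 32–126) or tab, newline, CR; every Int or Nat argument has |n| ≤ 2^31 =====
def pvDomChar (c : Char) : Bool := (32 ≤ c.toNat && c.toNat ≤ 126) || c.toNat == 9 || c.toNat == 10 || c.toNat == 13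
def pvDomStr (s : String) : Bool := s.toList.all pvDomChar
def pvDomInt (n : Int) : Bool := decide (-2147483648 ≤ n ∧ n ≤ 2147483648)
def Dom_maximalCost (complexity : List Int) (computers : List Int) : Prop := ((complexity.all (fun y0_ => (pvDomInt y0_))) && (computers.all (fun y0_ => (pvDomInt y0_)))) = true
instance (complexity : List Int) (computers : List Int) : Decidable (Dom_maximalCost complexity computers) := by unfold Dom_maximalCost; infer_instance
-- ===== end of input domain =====

-- B replaces A's sort-and-greedy matching scan by the sort-free Hall-deficiency
-- closed form len(tasks) - max(0, max_v (#tasks>=v - #computers>=v)) (objective: alternative).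

-- ===== PORT A =====
-- A's while loop: i walks the descending tasks; on a fit (co[i] <= cc[j]) also consume computer j.
def pvAloop : List Int → List Int → Int
  | [], _ => 0
  | _ :: _, [] => 0
  | t :: ts, c :: cs => if t ≤ c then 1 + pvAloop ts cs else pvAloop ts (c :: cs)

def maximalCost (complexity : List Int) (computers : List Int) : Int :=
  pvAloop (PySem.List.sorted complexity (fun x => x) true)
          (PySem.List.sorted computers (fun x => x) true)

-- ===== PORT B =====
-- sum(1 for x in xs if x >= v)
def pvCountGE (v : Int) (xs : List Int) : Int :=
  ((xs.filter (fun x => v ≤ x)).length : Int)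

def maximalCost_alt (complexity : List Int) (computers : List Int) : Int :=
  let best := complexity.foldl (fun best v =>
      let d := pvCountGE v complexity - pvCountGE v computers
      if d > best then d else best) 0
  (complexity.length : Int) - best

-- ===== PRECONDITION & SPEC =====
def Spec_maximalCost (complexity : List Int) (computers : List Int) (out : Int) : Prop := out = maximalCost_alt complexity computers
instance (complexity : List Int) (computers : List Int) (out : Int) : Decidable (Spec_maximalCost complexity computers out) := by unfold Spec_maximalCost; infer_instance

-- ===== CLAIM (what is proved, stated in full; the proofs are below) =====
def Claim_equal_maximalCost : Prop := ∀ (complexity : List Int) (computers : List Int), Dom_maximalCost complexity computers → Spec_maximalCost complexity computers (maximalCost complexity computers)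

-- ===== LEMMAS AND PROOFS =====

-- clamped max of f over a list
def pvMaxf (l : List Int) (f : Int → Int) : Int :=
  l.foldl (fun b v => max b (f v)) 0

theorem pvMaxf_init (f : Int → Int) : ∀ (l : List Int) (a c : Int),
    l.foldl (fun b v => max b (f v)) (max a c) =
      max (l.foldl (fun b v => max b (f v)) a) c := by
  intro l
  induction l with
  | nil => intro a c; rfl
  | cons v l ih =>
      intro a c
      simp only [List.foldl_cons]
      rw [show max (max a c) (f v) = max (max a (f v)) c by
            rw [max_right_comm], ih]

theorem pvMaxf_cons (t : Int) (l : List Int) (f : Int → Int) :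
    pvMaxf (t :: l) f = max (pvMaxf l f) (f t) := by
  unfold pvMaxf
  simp only [List.foldl_cons]
  have := pvMaxf_init f l 0 (f t)
  simpa using this

theorem pvMaxf_nonneg (l : List Int) (f : Int → Int) : 0 ≤ pvMaxf l f := by
  induction l with
  | nil => simp [pvMaxf]
  | cons t l ih => rw [pvMaxf_cons]; exact le_trans ih (le_max_left _ _)

theorem pvMaxf_le (l : List Int) (f : Int → Int) (K : Int)
    (h0 : 0 ≤ K) (h : ∀ v ∈ l, f v ≤ K) : pvMaxf l f ≤ K := by
  induction l with
  | nil => simpa [pvMaxf]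
  | cons t l ih =>
      rw [pvMaxf_cons]
      exact max_le (ih (fun v hv => h v (by simp [hv]))) (h t (by simp))

theorem pvLe_maxf (l : List Int) (f : Int → Int) (v : Int) (hv : v ∈ l) :
    f v ≤ pvMaxf l f := by
  induction l with
  | nil => cases hv
  | cons t l ih =>
      rw [pvMaxf_cons]
      rcases List.mem_cons.mp hv with h | h
      · subst h; exact le_max_right _ _
      · exact le_trans (ih h) (le_max_left _ _)

theorem pvMaxf_cases (l : List Int) (f : Int → Int) :
    pvMaxf l f = 0 ∨ ∃ v ∈ l, pvMaxf l f = f v := by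
  induction l with
  | nil => left; rfl
  | cons t l ih =>
      rw [pvMaxf_cons]
      rcases le_or_gt (f t) (pvMaxf l f) with h | h
      · rw [max_eq_left h]
        rcases ih with h0 | ⟨v, hv, he⟩
        · left; exact h0
        · right; exact ⟨v, by simp [hv], he⟩
      · rw [max_eq_right h.le]
        right; exact ⟨t, by simp⟩

theorem pvMaxf_congr (l : List Int) (f g : Int → Int)
    (h : ∀ v ∈ l, f v = g v) : pvMaxf l f = pvMaxf l g := by
  induction l with
  | nil => rfl
  | cons t l ih =>
      rw [pvMaxf_cons, pvMaxf_cons, h t (by simp),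
          ih (fun v hv => h v (by simp [hv]))]

theorem pvMaxf_perm (l l' : List Int) (f : Int → Int) (h : l.Perm l') :
    pvMaxf l f = pvMaxf l' f := by
  induction h with
  | nil => rfl
  | cons x _ ih => rw [pvMaxf_cons, pvMaxf_cons, ih]
  | swap x y l => rw [pvMaxf_cons, pvMaxf_cons, pvMaxf_cons, pvMaxf_cons, max_right_comm]
  | trans _ _ ih1 ih2 => rw [ih1, ih2]

-- counting facts
theorem pvCountGE_nonneg (v : Int) (xs : List Int) : 0 ≤ pvCountGE v xs := by
  unfold pvCountGE; positivity

theorem pvCountGE_le_length (v : Int) (xs : List Int) :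
    pvCountGE v xs ≤ (xs.length : Int) := by
  unfold pvCountGE
  exact_mod_cast List.length_filter_le _ _

theorem pvCountGE_cons_le (v t : Int) (xs : List Int) (h : v ≤ t) :
    pvCountGE v (t :: xs) = 1 + pvCountGE v xs := by
  unfold pvCountGE
  simp [h]
  ring

theorem pvCountGE_all_lt (v : Int) (xs : List Int) (h : ∀ x ∈ xs, x < v) :
    pvCountGE v xs = 0 := by
  unfold pvCountGE
  have : xs.filter (fun x => v ≤ x) = [] := by
    apply List.filter_eq_nil_iff.mpr
    intro x hx
    simpa using not_le.mpr (h x hx)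
  simp [this]

theorem pvCountGE_all_ge (v : Int) (xs : List Int) (h : ∀ x ∈ xs, v ≤ x) :
    pvCountGE v xs = (xs.length : Int) := by
  unfold pvCountGE
  have : xs.filter (fun x => v ≤ x) = xs := by
    apply List.filter_eq_self.mpr
    intro x hx; simpa using h x hx
  simp [this]

theorem pvCountGE_pos_mem (v : Int) (xs : List Int)
    (hdesc : ∀ x ∈ xs, x ≤ v) (h : pvCountGE v xs ≠ 0) : v ∈ xs := by
  unfold pvCountGE at h
  have hne : xs.filter (fun x => v ≤ x) ≠ [] := by
    intro he; simp [he] at h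
  rcases List.exists_mem_of_ne_nil _ hne with ⟨x, hx⟩
  have hx' := List.mem_filter.mp hx
  have : x = v := le_antisymm (hdesc x hx'.1) (by simpa using hx'.2)
  exact this ▸ hx'.1

theorem pvCountGE_perm (v : Int) (xs ys : List Int) (h : xs.Perm ys) :
    pvCountGE v xs = pvCountGE v ys := by
  unfold pvCountGE
  rw [(h.filter _).length_eq]

-- the deficiency function
def pvD (ts cs : List Int) (v : Int) : Int := pvCountGE v ts - pvCountGE v cs

-- the key bound: the deficiency at the head of a descending task list is
-- dominated by the clamped max over the tail
theorem pvD_head_le (t : Int) (ts' cs : List Int) (hts : ∀ x ∈ ts', x ≤ t) :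
    pvD ts' cs t ≤ pvMaxf ts' (pvD ts' cs) := by
  by_cases h : pvCountGE t ts' = 0
  · have : pvD ts' cs t ≤ 0 := by
      unfold pvD; have := pvCountGE_nonneg t cs; omega
    exact le_trans this (pvMaxf_nonneg _ _)
  · exact pvLe_maxf _ _ _ (pvCountGE_pos_mem t ts' hts h)

-- main invariant: on descending lists, A's greedy equals length minus max deficiency
theorem pvAloop_eq : ∀ (ts cs : List Int),
    ts.Pairwise (fun a b => b ≤ a) → cs.Pairwise (fun a b => b ≤ a) →
    pvAloop ts cs = (ts.length : Int) - pvMaxf ts (pvD ts cs) := by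
  intro ts
  induction ts with
  | nil => intro cs _ _; simp [pvAloop, pvMaxf]
  | cons t ts' ih =>
      intro cs hts hcs
      have hts1 := (List.pairwise_cons.mp hts).1
      have hts2 := (List.pairwise_cons.mp hts).2
      cases cs with
      | nil =>
          -- A returns 0; the max deficiency is the full length (at the minimum task)
          have hlast : (t :: ts').getLast (by simp) ∈ t :: ts' := List.getLast_mem _
          have hlast_le : ∀ x ∈ t :: ts', (t :: ts').getLast (by simp) ≤ x := by
            intro x hx
            have : ∀ (l : List Int), l.Pairwise (fun a b => b ≤ a) →
                ∀ (h : l ≠ []), ∀ x ∈ l, l.getLast h ≤ x := by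
              intro l
              induction l with
              | nil => intro _ h; cases h rfl
              | cons a l ihl =>
                  intro hp hne x hx
                  cases l with
                  | nil => simp at hx; simp [hx, List.getLast]
                  | cons b l' =>
                      have hp' := List.pairwise_cons.mp hp
                      rw [List.getLast_cons (by simp)]
                      rcases List.mem_cons.mp hx with h1 | h1
                      · subst h1
                        exact le_trans (ihl hp'.2 (by simp) b (by simp)) (hp'.1 b (by simp))
                      · exact ihl hp'.2 (by simp) x h1
            exact this (t :: ts') hts (by simp) x hx
          have hmax : pvMaxf (t :: ts') (pvD (t :: ts') []) = ((t :: ts').length : Int) := by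
            apply le_antisymm
            · apply pvMaxf_le _ _ _ (by positivity)
              intro v _
              unfold pvD
              have := pvCountGE_le_length v (t :: ts')
              have := pvCountGE_nonneg v ([] : List Int)
              omega
            · have h1 := pvLe_maxf (t :: ts') (pvD (t :: ts') []) _ hlast
              have h2 : pvD (t :: ts') [] ((t :: ts').getLast (by simp)) = ((t :: ts').length : Int) := by
                unfold pvD
                rw [pvCountGE_all_ge _ _ hlast_le]
                simp [pvCountGE]
              omega
          rw [hmax]
          simp [pvAloop]
      | cons c cs' =>
          have hcs1 := (List.pairwise_cons.mp hcs).1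
          have hcs2 := (List.pairwise_cons.mp hcs).2
          by_cases hm : t ≤ c
          · -- match case: max deficiency is unchanged
            have hD : ∀ v ∈ t :: ts', pvD (t :: ts') (c :: cs') v = pvD ts' cs' v := by
              intro v hv
              have hvt : v ≤ t := by
                rcases List.mem_cons.mp hv with h | h
                · simp [h]
                · exact hts1 v h
              unfold pvD
              rw [pvCountGE_cons_le v t ts' hvt, pvCountGE_cons_le v c cs' (le_trans hvt hm)]
              ring
            have hmax : pvMaxf (t :: ts') (pvD (t :: ts') (c :: cs')) = pvMaxf ts' (pvD ts' cs') := by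
              rw [pvMaxf_congr _ _ _ hD, pvMaxf_cons]
              exact max_eq_left (pvD_head_le t ts' cs' hts1)
            simp only [pvAloop, if_pos hm]
            rw [ih cs' hts2 hcs2, hmax]
            simp
            ring
          · -- skip case: every deficiency grows by exactly one
            have hclt : ∀ x ∈ c :: cs', x < t := by
              intro x hx
              rcases List.mem_cons.mp hx with h | h
              · omega
              · have := hcs1 x h; omega
            have hD : ∀ v ∈ t :: ts', pvD (t :: ts') (c :: cs') v = 1 + pvD ts' (c :: cs') v := by
              intro v hv
              have hvt : v ≤ t := by
                rcases List.mem_cons.mp hv with h | h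
                · simp [h]
                · exact hts1 v h
              unfold pvD
              rw [pvCountGE_cons_le v t ts' hvt]
              ring
            have hDt : pvD ts' (c :: cs') t = pvCountGE t ts' := by
              unfold pvD
              rw [pvCountGE_all_lt t _ hclt]
              ring
            have hhead_le : pvD ts' (c :: cs') t ≤ pvMaxf ts' (pvD ts' (c :: cs')) :=
              pvD_head_le t ts' (c :: cs') hts1
            have hmax : pvMaxf (t :: ts') (pvD (t :: ts') (c :: cs')) =
                1 + pvMaxf ts' (pvD ts' (c :: cs')) := by
              rw [pvMaxf_congr _ _ _ hD, pvMaxf_cons]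
              apply le_antisymm
              · apply max_le
                · apply pvMaxf_le
                  · have := pvMaxf_nonneg ts' (pvD ts' (c :: cs')); omega
                  · intro v hv
                    have := pvLe_maxf ts' (pvD ts' (c :: cs')) v hv
                    omega
                · omega
              · rcases pvMaxf_cases ts' (pvD ts' (c :: cs')) with h0 | ⟨v, hv, he⟩
                · rw [h0]
                  have h1 : (1 : Int) ≤ 1 + pvD ts' (c :: cs') t := by
                    rw [hDt]; have := pvCountGE_nonneg t ts'; omega
                  exact le_trans h1 (le_max_right _ _)
                · have h1 := pvLe_maxf ts' (fun v => 1 + pvD ts' (c :: cs') v) v hv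
                  simp only at h1
                  refine le_trans ?_ (le_max_left _ _)
                  omega
            simp only [pvAloop, if_neg hm]
            rw [ih (c :: cs') hts2 hcs, hmax]
            simp
            ring
-- rewrite B's fold as pvMaxf and transfer from sorted lists by permutation
theorem maximalCost_alt_eq (complexity computers : List Int) :
    maximalCost_alt complexity computers =
      (complexity.length : Int) - pvMaxf complexity (pvD complexity computers) := by
  unfold maximalCost_alt pvMaxf pvD
  refine congrArg (fun b => (complexity.length : Int) - b) ?_
  apply List.foldl_ext
  intro b v _
  dsimp only
  rcases le_or_gt (pvCountGE v complexity - pvCountGE v computers) b with h | h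
  · rw [if_neg (by omega), max_eq_left h]
  · rw [if_pos (by omega), max_eq_right h.le]

-- ===== VERDICT (by name: the statement is the Claim_ definition above) =====
theorem maximalCost_spec : Claim_equal_maximalCost := by
  intro complexity computers _
  unfold Spec_maximalCost maximalCost
  have hpt : (PySem.List.sorted complexity (fun x => x) true).Perm complexity :=
    PySem.List.sorted_perm complexity (fun x => x) true
  have hpc : (PySem.List.sorted computers (fun x => x) true).Perm computers :=
    PySem.List.sorted_perm computers (fun x => x) true
  rw [pvAloop_eq _ _ (by simpa using PySem.List.sorted_pairwise_rev complexity (fun x => x))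
        (by simpa using PySem.List.sorted_pairwise_rev computers (fun x => x)),
      maximalCost_alt_eq]
  rw [hpt.length_eq, pvMaxf_perm _ _ _ hpt]
  congr 1
  apply pvMaxf_congr
  intro v _
  unfold pvD
  rw [pvCountGE_perm v _ _ hpt, pvCountGE_perm v _ _ hpc]
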